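-- pv_equiv track=rewrite | github.com/XpNow/tool-v1 | phoenix-tool-pattern-v1/phoenix-tool/app/cli.py | _parse_flow_shortcut_args
-- ===== SOURCE A (Python) =====
-- def _parse_flow_shortcut_args(args: list[str]):
--     """Parse flow shortcut args after <id>. Returns (direction, depth, window, item_filter)."""
--     direction = None
--     depth = None
--     window = None
--     item_parts: list[str] = []
--
--     for a in args:
--         al = a.lower().strip()
--         if al in ("in", "out", "both"):
--             direction = al
--             continue
--         if al.isdigit():
--             if depth is None:
--                 depth = int(al)
--             elif window is None:
--                 window = int(al)
--             else:
--                 # ignore extra numbers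
--                 pass
--             continue
--         item_parts.append(a)
--
--     item = " ".join(item_parts).strip() or None
--     return direction, depth, window, item
-- ===== SOURCE B (Python) =====
-- def _parse_flow_shortcut_args(args: list[str]):
--     """Parse flow shortcut args after <id>. Returns (direction, depth, window, item_filter)."""
--     # Traverse right-to-left, merging each token in FRONT of the result so far:
--     # an earlier direction never overrides a later one, and a prepended number
--     # shifts depth into window (so the first two numbers from the left win).
--     d = dp = w = None
--     items_rev: list[str] = []
--     for a in reversed(args):
--         al = a.lower().strip()
--         if al in ("in", "out", "both"):
--             d = d if d is not None else al
--         elif al.isdigit():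
--             dp, w = int(al), dp
--         else:
--             items_rev.append(a)
--     items_rev.reverse()
--     item = " ".join(items_rev).strip() or None
--     return (d, dp, w, item)
-- ===== Notes on version B (the rewrite author's own statement) =====
-- stated objective: alternative
-- what changed: Replaces A's left-to-right stateful classification loop by a right-to-left traversal that merges each token in front of the result so far: a prepended number shifts depth into window and an earlier direction never overrides a later one, so first-two-numbers-win and last-direction-wins arise structurally instead of from mutable fill-in state.
import Mathlib
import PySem

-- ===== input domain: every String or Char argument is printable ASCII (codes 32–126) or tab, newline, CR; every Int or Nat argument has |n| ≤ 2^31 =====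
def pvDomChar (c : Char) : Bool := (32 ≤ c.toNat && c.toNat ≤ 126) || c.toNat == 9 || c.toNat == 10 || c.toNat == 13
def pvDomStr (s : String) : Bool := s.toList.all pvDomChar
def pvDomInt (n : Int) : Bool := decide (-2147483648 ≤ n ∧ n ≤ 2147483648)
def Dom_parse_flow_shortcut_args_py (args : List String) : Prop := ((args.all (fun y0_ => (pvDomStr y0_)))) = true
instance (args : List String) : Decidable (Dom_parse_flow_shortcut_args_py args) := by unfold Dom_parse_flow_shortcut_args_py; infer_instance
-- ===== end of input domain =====

-- B replaces A's left-to-right stateful classification loop with a right-to-left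
-- traversal that merges each token in FRONT of the result so far (a prepended
-- number shifts depth into window; a later direction wins);
-- objective: alternative decomposition, same cost.

-- shared token helpers (a.lower().strip(), the keyword test, int(al))
def pvNorm (a : String) : String := PySem.Str.strip (PySem.Str.lower a)
def pvIsKW (al : String) : Bool := al == "in" || al == "out" || al == "both"
def pvToInt (al : String) : Int := (PySem.Int.ofStr? al).getD 0
def pvIsDig (al : String) : Bool := PySem.Str.strIsdigit al

-- ===== PORT A =====
-- the for-loop of A over state (direction, depth, window, item_parts)
def pvLoopA : List String → Option String → Option Int → Option Int → List String →
    Option String × Option Int × Option Int × List String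
  | [], dir, dep, win, ps => (dir, dep, win, ps)
  | a :: rest, dir, dep, win, ps =>
    let al := pvNorm a
    if pvIsKW al then pvLoopA rest (some al) dep win ps
    else if pvIsDig al then
      match dep with
      | none => pvLoopA rest dir (some (pvToInt al)) win ps
      | some d =>
        match win with
        | none => pvLoopA rest dir (some d) (some (pvToInt al)) ps
        | some w => pvLoopA rest dir (some d) (some w) ps
    else pvLoopA rest dir dep win (ps ++ [a])

def parse_flow_shortcut_args_py (args : List String) : Option String × Option Int × Option Int × Option String :=
  match pvLoopA args none none none [] with
  | (dir, dep, win, ps) =>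
    let item := PySem.Str.strip (PySem.Str.join " " ps)
    (dir, dep, win, if item == "" then none else some item)

-- ===== PORT B =====
-- Source B's loop body over reversed(args): merge token a in front of the state
def pvStepB (st : Option String × Option Int × Option Int × List String) (a : String) :
    Option String × Option Int × Option Int × List String :=
  match st with
  | (d, dp, w, itemsRev) =>
    let al := pvNorm a
    if pvIsKW al then (if d.isSome then d else some al, dp, w, itemsRev)
    else if pvIsDig al then (d, some (pvToInt al), dp, itemsRev)
    else (d, dp, w, itemsRev ++ [a])

def parse_flow_shortcut_args_py_alt (args : List String) : Option String × Option Int × Option Int × Option String :=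
  match args.reverse.foldl pvStepB (none, none, none, []) with
  | (d, dp, w, itemsRev) =>
    let item := PySem.Str.strip (PySem.Str.join " " itemsRev.reverse)
    (d, dp, w, if item == "" then none else some item)

-- ===== PRECONDITION & SPEC =====
def Spec_parse_flow_shortcut_args_py (args : List String) (out : Option String × Option Int × Option Int × Option String) : Prop := out = parse_flow_shortcut_args_py_alt args
instance (args : List String) (out : Option String × Option Int × Option Int × Option String) : Decidable (Spec_parse_flow_shortcut_args_py args out) := by unfold Spec_parse_flow_shortcut_args_py; infer_instance

-- ===== CLAIM (what is proved, stated in full; the proofs are below) =====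
def Claim_equal_parse_flow_shortcut_args_py : Prop := ∀ (args : List String), Dom_parse_flow_shortcut_args_py args → Spec_parse_flow_shortcut_args_py args (parse_flow_shortcut_args_py args)

-- ===== LEMMAS AND PROOFS =====

-- selections that characterise both programs
def pvDirsOf (args : List String) : List String :=
  (args.filter (fun a => pvIsKW (pvNorm a))).map pvNorm
def pvNumsOf (args : List String) : List Int :=
  (args.filter (fun a => pvIsDig (pvNorm a))).map (fun a => pvToInt (pvNorm a))
def pvItemsOf (args : List String) : List String :=
  args.filter (fun a => !pvIsKW (pvNorm a) && !pvIsDig (pvNorm a))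

-- how (depth, window) absorb the numeric tokens in A
def pvFill : Option Int → Option Int → List Int → Option Int × Option Int
  | dep, win, [] => (dep, win)
  | none, win, n :: rest => pvFill (some n) win rest
  | some d, none, _n :: rest => pvFill (some d) (some (_n)) rest
  | some d, some w, _ :: _ => (some d, some w)

lemma pvFill_some_some (d w : Int) (l : List Int) : pvFill (some d) (some w) l = (some d, some w) := by
  cases l <;> rfl

lemma pvFill_some_none (d : Int) (l : List Int) : pvFill (some d) none l = (some d, l.head?) := by
  cases l with
  | nil => rfl
  | cons n rest => simp [pvFill, pvFill_some_some]

lemma pvFill_none_none (l : List Int) : pvFill none none l = (l.head?, l[1]?) := by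
  cases l with
  | nil => rfl
  | cons n rest => simp [pvFill, pvFill_some_none, List.head?_eq_getElem?]

lemma pvGetLast?_cons (x : String) (l : List String) : (x :: l).getLast? = l.getLast?.or (some x) := by
  cases l with
  | nil => rfl
  | cons y t =>
    rw [List.getLast?_cons_cons]
    have : (y :: t).getLast?.isSome := by simp [List.getLast?_isSome]
    obtain ⟨v, hv⟩ := Option.isSome_iff_exists.mp this
    simp [hv]

lemma pvKW_not_dig (al : String) (h : pvIsKW al = true) : pvIsDig al = false := by
  simp only [pvIsKW, Bool.or_eq_true, beq_iff_eq] at h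
  rcases h with (h | h) | h <;> subst h <;> decide

lemma pvLoopA_spec (args : List String) (dir : Option String) (dep win : Option Int) (ps : List String) :
    pvLoopA args dir dep win ps =
      ((pvDirsOf args).getLast?.or dir,
       (pvFill dep win (pvNumsOf args)).1,
       (pvFill dep win (pvNumsOf args)).2,
       ps ++ pvItemsOf args) := by
  induction args generalizing dir dep win ps with
  | nil => simp [pvLoopA, pvDirsOf, pvNumsOf, pvItemsOf, pvFill]
  | cons a rest ih =>
    by_cases h1 : pvIsKW (pvNorm a) = true
    · have hd := pvKW_not_dig _ h1
      have hdir : pvDirsOf (a :: rest) = pvNorm a :: pvDirsOf rest := by simp [pvDirsOf, h1]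
      have hnum : pvNumsOf (a :: rest) = pvNumsOf rest := by simp [pvNumsOf, hd]
      have hit : pvItemsOf (a :: rest) = pvItemsOf rest := by simp [pvItemsOf, h1]
      simp only [pvLoopA, h1, if_true, ih]
      rw [hdir, hnum, hit, pvGetLast?_cons, Option.or_assoc]
      simp
    · by_cases h2 : pvIsDig (pvNorm a) = true
      · have hsimp : pvNumsOf (a :: rest) = pvToInt (pvNorm a) :: pvNumsOf rest := by
          simp [pvNumsOf, h2]
        have hdir : pvDirsOf (a :: rest) = pvDirsOf rest := by
          simp [pvDirsOf, h1]
        have hit : pvItemsOf (a :: rest) = pvItemsOf rest := by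
          simp [pvItemsOf, h2]
        cases dep with
        | none =>
          simp only [pvLoopA, h1, h2, if_false, if_true, Bool.false_eq_true, ih]
          rw [hsimp, hdir, hit]; rfl
        | some d =>
          cases win with
          | none =>
            simp only [pvLoopA, h1, h2, if_false, if_true, Bool.false_eq_true, ih]
            rw [hsimp, hdir, hit]; rfl
          | some w =>
            simp only [pvLoopA, h1, h2, if_false, if_true, Bool.false_eq_true, ih]
            rw [hsimp, hdir, hit, pvFill_some_some, pvFill_some_some]
      · have hdir : pvDirsOf (a :: rest) = pvDirsOf rest := by
          simp [pvDirsOf, h1]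
        have hnum : pvNumsOf (a :: rest) = pvNumsOf rest := by
          simp [pvNumsOf, h2]
        have hit : pvItemsOf (a :: rest) = a :: pvItemsOf rest := by
          simp [pvItemsOf, h1, h2]
        simp only [pvLoopA, h1, h2, if_false, Bool.false_eq_true, ih]
        rw [hdir, hnum, hit]
        simp

lemma pvGoB_spec (args : List String) :
    args.reverse.foldl pvStepB (none, none, none, []) =
      ((pvDirsOf args).getLast?, (pvNumsOf args).head?, (pvNumsOf args)[1]?,
       (pvItemsOf args).reverse) := by
  induction args with
  | nil => rfl
  | cons a rest ih =>
    rw [List.reverse_cons, List.foldl_append, ih]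
    simp only [List.foldl_cons, List.foldl_nil]
    by_cases h1 : pvIsKW (pvNorm a) = true
    · have hd := pvKW_not_dig _ h1
      have hdir : pvDirsOf (a :: rest) = pvNorm a :: pvDirsOf rest := by simp [pvDirsOf, h1]
      have hnum : pvNumsOf (a :: rest) = pvNumsOf rest := by simp [pvNumsOf, hd]
      have hit : pvItemsOf (a :: rest) = pvItemsOf rest := by simp [pvItemsOf, h1]
      simp only [pvStepB, h1, if_true]
      rw [hdir, hnum, hit, pvGetLast?_cons]
      cases (pvDirsOf rest).getLast? <;> simp [Option.or]
    · by_cases h2 : pvIsDig (pvNorm a) = true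
      · have hnum : pvNumsOf (a :: rest) = pvToInt (pvNorm a) :: pvNumsOf rest := by
          simp [pvNumsOf, h2]
        have hdir : pvDirsOf (a :: rest) = pvDirsOf rest := by simp [pvDirsOf, h1]
        have hit : pvItemsOf (a :: rest) = pvItemsOf rest := by simp [pvItemsOf, h2]
        simp only [pvStepB, h1, h2, if_false, if_true, Bool.false_eq_true]
        rw [hdir, hnum, hit]
        simp [List.head?_eq_getElem?]
      · have hdir : pvDirsOf (a :: rest) = pvDirsOf rest := by simp [pvDirsOf, h1]
        have hnum : pvNumsOf (a :: rest) = pvNumsOf rest := by simp [pvNumsOf, h2]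
        have hit : pvItemsOf (a :: rest) = a :: pvItemsOf rest := by simp [pvItemsOf, h1, h2]
        simp only [pvStepB, h1, h2, if_false, Bool.false_eq_true]
        rw [hdir, hnum, hit]
        simp

-- ===== VERDICT (by name: the statement is the Claim_ definition above) =====
theorem parse_flow_shortcut_args_py_spec : Claim_equal_parse_flow_shortcut_args_py := by
  intro args _
  unfold Spec_parse_flow_shortcut_args_py parse_flow_shortcut_args_py parse_flow_shortcut_args_py_alt
  rw [pvLoopA_spec, pvGoB_spec, pvFill_none_none]
  simp
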